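-- pv_equiv track=rewrite | github.com/Ruqing1963/paramodular-goldbach-frey | scripts/verify_conductor.py | compute_discriminant_from_roots
-- ===== SOURCE A (Python) =====
-- def compute_discriminant_from_roots(p, N):
--     """Compute Δ = ∏_{i<j} (e_i - e_j)^2 directly from roots."""
--     q = 2 * N - p
--     roots = [0, p, -p, q, -q]
--     disc = 1
--     for i in range(len(roots)):
--         for j in range(i + 1, len(roots)):
--             disc *= (roots[i] - roots[j]) ** 2
--     return disc
-- ===== SOURCE B (Python) =====
-- def compute_discriminant_from_roots(p, N):
--     """Closed form of prod_{i<j}(e_i-e_j)^2 over roots {0, p, -p, q, -q}."""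
--     q = 2 * N - p
--     return 16 * p**6 * q**6 * (p - q)**4 * (p + q)**4
-- ===== Notes on version B (the rewrite author's own statement) =====
-- stated objective: simpler
-- what changed: Replaced the nested double loop over root pairs with the algebraic closed form 16*p^6*q^6*(p-q)^4*(p+q)^4 obtained by multiplying out the symmetric pairwise differences.
import Mathlib
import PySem

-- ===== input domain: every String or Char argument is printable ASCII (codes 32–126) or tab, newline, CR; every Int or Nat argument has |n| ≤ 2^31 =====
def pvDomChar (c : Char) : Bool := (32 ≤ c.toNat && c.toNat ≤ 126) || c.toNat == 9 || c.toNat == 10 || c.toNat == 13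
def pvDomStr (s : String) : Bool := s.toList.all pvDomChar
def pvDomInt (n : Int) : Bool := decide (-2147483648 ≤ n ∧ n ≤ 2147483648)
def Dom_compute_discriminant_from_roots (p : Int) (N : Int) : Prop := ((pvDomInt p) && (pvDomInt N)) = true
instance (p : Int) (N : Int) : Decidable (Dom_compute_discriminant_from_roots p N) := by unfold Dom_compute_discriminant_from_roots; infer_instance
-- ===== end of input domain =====

-- B replaces A's nested loop over root pairs by the expanded closed form; objective: simpler.

-- ===== PORT A =====
-- literal transliteration: roots list, nested loops over indices, in-range indexing via pyGet? (always Some here)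
def compute_discriminant_from_roots (p : Int) (N : Int) : Int :=
  let q : Int := 2 * N - p
  let roots : List Int := [0, p, -p, q, -q]
  let disc : Int :=
    (PySem.List.pyRange 0 (roots.length : Int) 1).foldl (fun disc i =>
      (PySem.List.pyRange (i + 1) (roots.length : Int) 1).foldl (fun disc j =>
        disc * ((PySem.List.pyGet? roots i).getD 0 - (PySem.List.pyGet? roots j).getD 0) ^ 2) disc) 1
  disc

-- ===== PORT B =====
def compute_discriminant_from_roots_alt (p : Int) (N : Int) : Int :=
  let q : Int := 2 * N - p
  16 * p ^ 6 * q ^ 6 * (p - q) ^ 4 * (p + q) ^ 4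

-- ===== PRECONDITION & SPEC =====
def Spec_compute_discriminant_from_roots (p : Int) (N : Int) (out : Int) : Prop := out = compute_discriminant_from_roots_alt p N
instance (p : Int) (N : Int) (out : Int) : Decidable (Spec_compute_discriminant_from_roots p N out) := by unfold Spec_compute_discriminant_from_roots; infer_instance

-- ===== CLAIM (what is proved, stated in full; the proofs are below) =====
def Claim_equal_compute_discriminant_from_roots : Prop := ∀ (p : Int) (N : Int), Dom_compute_discriminant_from_roots p N → Spec_compute_discriminant_from_roots p N (compute_discriminant_from_roots p N)

-- ===== LEMMAS AND PROOFS =====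

-- ===== VERDICT (by name: the statement is the Claim_ definition above) =====
theorem compute_discriminant_from_roots_spec : Claim_equal_compute_discriminant_from_roots := by
  intro p N _
  show compute_discriminant_from_roots p N = compute_discriminant_from_roots_alt p N
  simp only [compute_discriminant_from_roots, compute_discriminant_from_roots_alt,
    PySem.List.pyRange, PySem.List.pyGet?, PySem.List.pyIdx?]
  simp [List.range_succ, List.foldl_cons, List.foldl_nil]
  ring
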